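-- pv_equiv track=rewrite | github.com/JoseRoberto1506/Faculdade | PISI - 2/Treino de programação/Exercícios de recursão/Rec - Ex 12.py | quantidade
-- ===== SOURCE A (Python) =====
-- def quantidade(cont, k, n):
--     # cont = Quantidade de dígitos a serem verificados
--     if cont > 0:
--         if k == n[0]:
--             return 1 + quantidade(cont - 1, k, n[1:])
--         else:
--             return quantidade(cont - 1, k, n[1:])
--     else:
--         return 0
-- ===== SOURCE B (Python) =====
-- def quantidade(cont, k, n):
--     count = 0
--     for i in range(cont):
--         if n[i] == k:
--             count += 1
--     return count
-- ===== Notes on version B (the rewrite author's own statement) =====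
-- stated objective: idiomatic
-- what changed: Replaces the recursion with list slicing by a single iterative indexed loop accumulating a counter.
import Mathlib
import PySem

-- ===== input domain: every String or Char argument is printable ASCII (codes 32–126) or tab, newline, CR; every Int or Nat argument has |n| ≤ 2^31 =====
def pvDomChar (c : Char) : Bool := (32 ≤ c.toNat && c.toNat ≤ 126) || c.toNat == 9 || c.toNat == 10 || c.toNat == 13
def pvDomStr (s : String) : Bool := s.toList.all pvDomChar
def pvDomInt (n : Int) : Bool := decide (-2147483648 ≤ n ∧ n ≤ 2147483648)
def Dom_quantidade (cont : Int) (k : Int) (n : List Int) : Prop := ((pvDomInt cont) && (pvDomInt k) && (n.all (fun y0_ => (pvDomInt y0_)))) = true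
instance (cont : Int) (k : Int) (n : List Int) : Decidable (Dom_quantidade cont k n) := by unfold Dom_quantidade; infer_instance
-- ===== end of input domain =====

-- B replaces A's slice-copying recursion by a single iterative indexed loop with a counter.

-- ===== PORT A =====
def quantidade (cont : Int) (k : Int) (n : List Int) : Int :=
  if 0 < cont then
    if k = PySem.List.pyGetD n 0 0 then
      1 + quantidade (cont - 1) k (PySem.List.slice n (some 1) none)
    else
      quantidade (cont - 1) k (PySem.List.slice n (some 1) none)
  else 0
termination_by cont.toNat
decreasing_by all_goals omega

-- ===== PORT B =====
def quantidade_alt (cont : Int) (k : Int) (n : List Int) : Int :=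
  (PySem.List.pyRange 0 cont 1).foldl
    (fun count i => if PySem.List.pyGetD n i 0 = k then count + 1 else count) 0

-- ===== PRECONDITION & SPEC =====
-- Pre_ excludes exactly the inputs where Python A raises IndexError (cont exceeds len(n)).
def Pre_quantidade (cont : Int) (k : Int) (n : List Int) : Prop := cont ≤ n.length
instance (cont : Int) (k : Int) (n : List Int) : Decidable (Pre_quantidade cont k n) := by unfold Pre_quantidade; infer_instance
def pvWitness_quantidade : Int × Int × List Int := (3, 2, [2, 1, 2, 5])
def Spec_quantidade (cont : Int) (k : Int) (n : List Int) (out : Int) : Prop := out = quantidade_alt cont k n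
instance (cont : Int) (k : Int) (n : List Int) (out : Int) : Decidable (Spec_quantidade cont k n out) := by unfold Spec_quantidade; infer_instance

-- ===== CLAIM (what is proved, stated in full; the proofs are below) =====
def Claim_equal_quantidade : Prop := ∀ (cont : Int) (k : Int) (n : List Int), Dom_quantidade cont k n → Pre_quantidade cont k n → Spec_quantidade cont k n (quantidade cont k n)

-- ===== LEMMAS AND PROOFS =====

-- A computes the count of k among the first m elements.
theorem quantidade_eq_countP (m : Nat) (k : Int) (n : List Int) (h : m ≤ n.length) :
    quantidade (m : Int) k n = ((n.take m).countP (fun x => x = k) : Nat) := by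
  induction m generalizing n with
  | zero => simp [quantidade]
  | succ m ih =>
    cases n with
    | nil => simp at h
    | cons x xs =>
      rw [quantidade]
      have hpos : (0 : Int) < ((m + 1 : Nat) : Int) := by push_cast; omega
      have hsub : ((m + 1 : Nat) : Int) - 1 = (m : Int) := by push_cast; ring
      rw [if_pos hpos, PySem.List.slice_from_one, hsub]
      simp only [List.tail_cons]
      have hm : m ≤ xs.length := by simpa using h
      rw [ih xs hm]
      simp only [PySem.List.pyGetD_zero_cons, List.take_succ_cons, List.countP_cons]
      by_cases hk : k = x
      · subst hk; simp; omega
      · rw [if_neg hk]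
        have : ¬ (x = k) := fun h' => hk h'.symm
        simp [this]

-- B's loop counts the same thing.
theorem countP_pyRange_eq (m : Nat) (k : Int) (n : List Int) (h : m ≤ n.length) :
    (PySem.List.pyRange 0 (m : Int) 1).countP (fun i => decide (PySem.List.pyGetD n i 0 = k)) =
      (n.take m).countP (fun x => decide (x = k)) := by
  induction m with
  | zero => simp
  | succ m ih =>
    have hm : m ≤ n.length := Nat.le_of_succ_le h
    have hlt : m < n.length := h
    have hcast : ((m + 1 : Nat) : Int) = (m : Int) + 1 := by push_cast; ring
    have htake : n.take (m + 1) = n.take m ++ [n[m]] := by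
      rw [List.take_succ]
      simp [List.getElem?_eq_getElem hlt]
    have hget : PySem.List.pyGetD n (m : Int) 0 = n[m] := by
      rw [PySem.List.pyGetD_natCast, List.getD_eq_getElem?_getD, List.getElem?_eq_getElem hlt]
      rfl
    rw [hcast, PySem.List.pyRange_one_succ_right (by positivity), List.countP_append, ih hm,
      htake, List.countP_append]
    simp [hget]

theorem quantidade_alt_eq_countP (m : Nat) (k : Int) (n : List Int) (h : m ≤ n.length) :
    quantidade_alt (m : Int) k n = ((n.take m).countP (fun x => x = k) : Nat) := by
  unfold quantidade_alt
  have hfc := PySem.List.foldl_count_if (fun i => decide (PySem.List.pyGetD n i 0 = k))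
    (PySem.List.pyRange 0 (m : Int) 1) 0
  simp only [decide_eq_true_eq] at hfc
  rw [hfc, zero_add, countP_pyRange_eq m k n h]

theorem quantidade_alt_nonpos (cont : Int) (k : Int) (n : List Int) (h : cont ≤ 0) :
    quantidade_alt cont k n = 0 := by
  unfold quantidade_alt
  rw [PySem.List.pyRange_one_eq_nil h]
  rfl

-- ===== VERDICT (by name: the statement is the Claim_ definition above) =====
theorem quantidade_spec : Claim_equal_quantidade := by
  intro cont k n _ hpre
  unfold Spec_quantidade
  by_cases hc : 0 < cont
  · have hm : cont = ((cont.toNat : Nat) : Int) := by omega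
    have hlen : cont.toNat ≤ n.length := by
      unfold Pre_quantidade at hpre; omega
    rw [hm, quantidade_eq_countP _ k n hlen, quantidade_alt_eq_countP _ k n hlen]
  · rw [quantidade, if_neg hc, quantidade_alt_nonpos cont k n (by omega)]
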